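-- pv_equiv track=rewrite | github.com/mmontalbo/binary_man | tools/format_commit.py | _split_context_lines
-- ===== SOURCE A (Python) =====
-- MAX_CONTEXT_LINES = 8
--
-- def _split_context_lines(entries: list[str]) -> list[str]:
--     lines = []
--     for entry in entries:
--         for raw_line in entry.splitlines():
--             lines.append(raw_line.rstrip())
--     while lines and not lines[0].strip():
--         lines.pop(0)
--     while lines and not lines[-1].strip():
--         lines.pop()
--     if not lines:
--         raise ValueError("--context entries must be non-empty")
--
--     cleaned = []
--     blank_run = 0
--     non_empty = 0
--     for line in lines:
--         if not line.strip():
--             blank_run += 1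
--             if blank_run > 1:
--                 raise ValueError("context must not contain consecutive blank lines")
--             cleaned.append("")
--         else:
--             blank_run = 0
--             non_empty += 1
--             cleaned.append(line.strip())
--     if non_empty > MAX_CONTEXT_LINES:
--         raise ValueError(f"context must be 1-{MAX_CONTEXT_LINES} lines")
--     return cleaned
-- ===== SOURCE B (Python) =====
-- MAX_CONTEXT_LINES = 8
--
-- def _split_context_lines(entries: list[str]) -> list[str]:
--     lines = [raw.rstrip() for entry in entries for raw in entry.splitlines()]
--     keep = [i for i, line in enumerate(lines) if line.strip()]
--     if not keep:
--         raise ValueError("--context entries must be non-empty")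
--     trimmed = lines[keep[0]:keep[-1] + 1]
--     if any(not a.strip() and not b.strip() for a, b in zip(trimmed, trimmed[1:])):
--         raise ValueError("context must not contain consecutive blank lines")
--     if len(keep) > MAX_CONTEXT_LINES:
--         raise ValueError(f"context must be 1-{MAX_CONTEXT_LINES} lines")
--     return [line.strip() for line in trimmed]
-- ===== Notes on version B (the rewrite author's own statement) =====
-- stated objective: simpler
-- what changed: Replaces A's destructive while-pop trimming and single stateful pass (blank_run/non_empty counters with raises inside the loop) by independent declarative passes: a flattening comprehension, trimming via the list of non-blank indices and one slice, a zip-pairwise adjacent-blank check, a length check on the index list, and a final strip map.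
import Mathlib
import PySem

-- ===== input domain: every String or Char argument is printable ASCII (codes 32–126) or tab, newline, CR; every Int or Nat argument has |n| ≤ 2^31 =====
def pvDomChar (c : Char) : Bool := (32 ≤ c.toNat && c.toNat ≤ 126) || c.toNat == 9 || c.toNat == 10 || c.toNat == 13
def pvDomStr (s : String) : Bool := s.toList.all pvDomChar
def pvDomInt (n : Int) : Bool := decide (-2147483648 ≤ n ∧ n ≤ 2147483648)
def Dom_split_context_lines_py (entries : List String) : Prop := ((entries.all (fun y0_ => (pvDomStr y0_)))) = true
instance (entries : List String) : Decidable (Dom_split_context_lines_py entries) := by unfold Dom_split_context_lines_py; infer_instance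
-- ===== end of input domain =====

-- B replaces A's destructive while-pop trimming and stateful validation loop by independent
-- declarative passes (index list + slice, zip-pairwise blank check, strip map); objective: simpler.


-- ===== PORT A =====
-- 'while lines and not lines[0].strip(): lines.pop(0)'
def pvA_dropLead : List String → List String
  | [] => []
  | l :: ls => if PySem.Str.strip l == "" then pvA_dropLead ls else l :: ls

-- 'while lines and not lines[-1].strip(): lines.pop()'
def pvA_dropTrail (xs : List String) : List String :=
  match h : xs.getLast? with
  | none => xs
  | some l =>
      if PySem.Str.strip l == "" then pvA_dropTrail xs.dropLast else xs
termination_by xs.length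
decreasing_by
  have hne : xs ≠ [] := by rintro rfl; simp at h
  have := List.length_pos_iff.mpr hne
  simp [List.length_dropLast]; omega

-- the 'for line in lines' validation loop; none = the in-loop ValueError (consecutive blanks)
def pvA_loop : List String → Int → Int → List String → Option (List String × Int)
  | [], _, ne, cleaned => some (cleaned, ne)
  | line :: rest, br, ne, cleaned =>
      if PySem.Str.strip line == "" then
        if br + 1 > 1 then none
        else pvA_loop rest (br + 1) ne (cleaned ++ [""])
      else pvA_loop rest 0 (ne + 1) (cleaned ++ [PySem.Str.strip line])

def split_context_lines_py (entries : List String) : List String :=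
  let lines := entries.foldl
    (fun acc entry => (PySem.Str.splitlines entry).foldl
      (fun acc2 raw => acc2 ++ [PySem.Str.rstrip raw]) acc) []
  let lines := pvA_dropTrail (pvA_dropLead lines)
  if lines = [] then []                     -- raise ValueError("--context entries must be non-empty")
  else
    match pvA_loop lines 0 0 [] with
    | none => []                            -- raise ValueError("context must not contain consecutive blank lines")
    | some (cleaned, ne) => if ne > 8 then [] else cleaned   -- raise ValueError("context must be 1-8 lines")

-- ===== PORT B =====
def pvFlatLines (entries : List String) : List String :=
  entries.flatMap (fun entry => (PySem.Str.splitlines entry).map PySem.Str.rstrip)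

def split_context_lines_py_alt (entries : List String) : List String :=
  let lines := pvFlatLines entries
  let keep := ((PySem.List.enumerate lines 0).filter
      (fun p => PySem.Str.strip p.2 != "")).map (fun p => p.1)
  match keep with
  | [] => []                                -- raise ValueError("--context entries must be non-empty")
  | k0 :: ks =>
      let trimmed := PySem.List.slice lines (some k0) (some ((k0 :: ks).getLast (by simp) + 1))
      if (trimmed.zip (PySem.List.slice trimmed (some 1) none)).any
          (fun p => PySem.Str.strip p.1 == "" && PySem.Str.strip p.2 == "") then []
                                            -- raise ValueError("context must not contain consecutive blank lines")
      else if PySem.List.len (k0 :: ks) > 8 then []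
                                            -- raise ValueError("context must be 1-8 lines")
      else trimmed.map PySem.Str.strip

-- ===== PRECONDITION & SPEC =====
def pvBlank (l : String) : Bool := PySem.Str.strip l == ""

def pvTrimmed (entries : List String) : List String :=
  (((pvFlatLines entries).dropWhile pvBlank).reverse.dropWhile pvBlank).reverse

-- Pre_ excludes exactly the inputs on which A raises ValueError: no context line at all after
-- trimming, two consecutive blank lines, or more than 8 non-blank lines.
def Pre_split_context_lines_py (entries : List String) : Prop :=
  pvTrimmed entries ≠ [] ∧
  ((pvTrimmed entries).zip (pvTrimmed entries).tail).all
      (fun p => !(pvBlank p.1 && pvBlank p.2)) = true ∧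
  (pvTrimmed entries).countP (fun l => !pvBlank l) ≤ 8

instance (entries : List String) : Decidable (Pre_split_context_lines_py entries) := by
  unfold Pre_split_context_lines_py; infer_instance

def pvWitness_split_context_lines_py : List String := ["ctx line"]

def Spec_split_context_lines_py (entries : List String) (out : List String) : Prop :=
  out = split_context_lines_py_alt entries
instance (entries : List String) (out : List String) :
    Decidable (Spec_split_context_lines_py entries out) := by
  unfold Spec_split_context_lines_py; infer_instance

-- ===== CLAIM (what is proved, stated in full; the proofs are below) =====
def Claim_equal_split_context_lines_py : Prop :=
  ∀ (entries : List String), Dom_split_context_lines_py entries →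
    Pre_split_context_lines_py entries →
    Spec_split_context_lines_py entries (split_context_lines_py entries)

-- ===== LEMMAS AND PROOFS =====

-- proof-side abbreviation: drop trailing blank lines
def pvDT (xs : List String) : List String := (xs.reverse.dropWhile pvBlank).reverse

-- indices (from s) of the non-blank lines, as naturals; proof-side mirror of B's `keep`
def pvIdx : List String → Nat → List Nat
  | [], _ => []
  | x :: xs, s => if pvBlank x then pvIdx xs (s + 1) else s :: pvIdx xs (s + 1)

theorem pvIdx_succ (xs : List String) (s : Nat) :
    pvIdx xs (s + 1) = (pvIdx xs s).map (· + 1) := by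
  induction xs generalizing s with
  | nil => rfl
  | cons x xs ih =>
    by_cases hb : pvBlank x = true <;> simp [pvIdx, hb, ih]

theorem pvIdx_eq_nil_iff (xs : List String) (s : Nat) :
    pvIdx xs s = [] ↔ ∀ x ∈ xs, pvBlank x = true := by
  induction xs generalizing s with
  | nil => simp [pvIdx]
  | cons x xs ih =>
    by_cases hb : pvBlank x = true <;> simp [pvIdx, hb, ih]

theorem pvIdx_length (xs : List String) (s : Nat) :
    (pvIdx xs s).length = xs.countP (fun l => !pvBlank l) := by
  induction xs generalizing s with
  | nil => rfl
  | cons x xs ih =>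
    by_cases hb : pvBlank x = true <;>
      simp [pvIdx, hb, ih]

theorem pvKeep_eq (xs : List String) (s : Nat) :
    ((PySem.List.enumerate xs (s : Int)).filter
        (fun p => PySem.Str.strip p.2 != "")).map (fun p => p.1) =
      (pvIdx xs s).map (Nat.cast : Nat → Int) := by
  induction xs generalizing s with
  | nil => simp [PySem.List.enumerate_nil, pvIdx]
  | cons x xs ih =>
    rw [PySem.List.enumerate_cons]
    have hc : ((s : Int) + 1) = ((s + 1 : Nat) : Int) := by push_cast; ring
    rw [hc, List.filter_cons, pvIdx]
    by_cases hb : pvBlank x = true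
    · have hs : PySem.Str.strip x = "" := by simpa [pvBlank] using hb
      rw [if_neg (by simp [hs]), if_pos hb, ih]
    · have hs : ¬ PySem.Str.strip x = "" := by simpa [pvBlank] using hb
      rw [if_pos (by simp [hs]), if_neg hb, List.map_cons, ih]
      simp

theorem pvDT_cons (x : String) (rest : List String)
    (h : ¬ ∀ y ∈ rest, pvBlank y = true) : pvDT (x :: rest) = x :: pvDT rest := by
  have hdw : rest.reverse.dropWhile pvBlank ≠ [] := by
    rw [Ne, List.dropWhile_eq_nil_iff]
    intro hall; exact h fun y hy => hall y (by simpa using hy)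
  unfold pvDT
  rw [List.reverse_cons, List.dropWhile_append,
    if_neg (by simpa [List.isEmpty_iff] using hdw)]
  simp

theorem pvDT_singleton_of_all_blank (x : String) (rest : List String)
    (hx : pvBlank x = false) (h : ∀ y ∈ rest, pvBlank y = true) :
    pvDT (x :: rest) = [x] := by
  unfold pvDT
  rw [List.reverse_cons, List.dropWhile_append,
    if_pos (by simp [List.dropWhile_eq_nil_iff]; exact fun y hy => h y (by simpa using hy))]
  simp [List.dropWhile, hx]

-- trailing-trim as a take, located by the last non-blank index
theorem pvTake_eq_DT (xs : List String) (kl : Nat)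
    (h : (pvIdx xs 0).getLast? = some kl) : xs.take (kl + 1) = pvDT xs := by
  induction xs generalizing kl with
  | nil => simp [pvIdx] at h
  | cons x rest ih =>
    rcases he : pvIdx rest 0 with _ | ⟨a, as⟩
    · -- rest is all blank
      have hall : ∀ y ∈ rest, pvBlank y = true := (pvIdx_eq_nil_iff rest 0).mp he
      by_cases hb : pvBlank x = true
      · rw [pvIdx, if_pos hb, pvIdx_succ, he] at h; simp at h
      · rw [pvIdx, if_neg hb, pvIdx_succ, he] at h; simp at h
        subst h
        rw [List.take_succ_cons, List.take_zero,
          pvDT_singleton_of_all_blank x rest (by simpa using hb) hall]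
    · -- rest contains a non-blank line
      have hne : ¬ ∀ y ∈ rest, pvBlank y = true := by
        intro hall
        have h2 := (pvIdx_eq_nil_iff rest 0).mpr hall
        rw [he] at h2; simp at h2
      have hlast : (pvIdx rest 0).getLast? = some ((a :: as).getLast (by simp)) := by
        rw [he, List.getLast?_eq_some_getLast]
      set l := (a :: as).getLast (by simp) with hl
      have hlast' : (a :: as).getLast? = some l := by rw [← he]; exact hlast
      have hkl : kl = l + 1 := by
        by_cases hb : pvBlank x = true
        · rw [pvIdx, if_pos hb, pvIdx_succ, List.getLast?_map, hlast] at h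
          simpa using h.symm
        · rw [pvIdx, if_neg hb, pvIdx_succ, he, List.map_cons,
            List.getLast?_cons_cons] at h
          have hm : ((a :: as).map (fun x => x + 1)).getLast? = some (l + 1) := by
            rw [List.getLast?_map, hlast']; rfl
          rw [List.map_cons] at hm
          rw [hm] at h
          simp at h; omega
      subst hkl
      rw [List.take_succ_cons, ih l hlast, pvDT_cons x rest hne]

-- full trim as drop-then-take, located by the first and last non-blank indices
theorem pvSlice_eq_trim (xs : List String) (k0 kl : Nat)
    (h0 : (pvIdx xs 0).head? = some k0) (h1 : (pvIdx xs 0).getLast? = some kl) :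
    (xs.drop k0).take (kl + 1 - k0) = pvDT (xs.dropWhile pvBlank) := by
  induction xs generalizing k0 kl with
  | nil => simp [pvIdx] at h0
  | cons x rest ih =>
    by_cases hb : pvBlank x = true
    · rw [pvIdx, if_pos hb, pvIdx_succ] at h0 h1
      rw [List.head?_map] at h0
      rw [List.getLast?_map] at h1
      rcases hh : (pvIdx rest 0).head? with _ | a
      · rw [hh] at h0; simp at h0
      rcases hl : (pvIdx rest 0).getLast? with _ | b
      · rw [hl] at h1; simp at h1
      rw [hh] at h0; rw [hl] at h1; simp at h0 h1
      subst h0; subst h1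
      rw [List.dropWhile_cons_of_pos hb, List.drop_succ_cons]
      have harith : b + 1 + 1 - (a + 1) = b + 1 - a := by omega
      rw [harith]
      exact ih a b hh hl
    · rw [pvIdx, if_neg hb] at h0 h1
      simp at h0
      subst h0
      rw [List.drop_zero, Nat.sub_zero,
        List.dropWhile_cons_of_neg (by simp [hb])]
      exact pvTake_eq_DT _ kl (by rw [pvIdx, if_neg hb]; exact h1)

-- A's helpers compute dropWhile / pvDT
theorem pvA_dropLead_eq (xs : List String) :
    pvA_dropLead xs = xs.dropWhile pvBlank := by
  induction xs with
  | nil => rfl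
  | cons x xs ih =>
    show (if PySem.Str.strip x == "" then pvA_dropLead xs else x :: xs) = _
    by_cases hb : (PySem.Str.strip x == "") = true
    · rw [if_pos hb, List.dropWhile_cons_of_pos (show pvBlank x = true from hb), ih]
    · rw [if_neg hb, List.dropWhile_cons_of_neg (show ¬ pvBlank x = true from hb)]

theorem pvA_dropTrail_eq (xs : List String) : pvA_dropTrail xs = pvDT xs := by
  induction xs using List.reverseRecOn with
  | nil => rw [pvA_dropTrail]; rfl
  | append_singleton ys l ih =>
    rw [pvA_dropTrail]
    simp only [List.dropLast_concat]
    unfold pvDT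
    rw [List.reverse_append]
    simp only [List.reverse_cons, List.reverse_nil, List.nil_append, List.singleton_append]
    split
    · next heq => rw [List.getLast?_concat] at heq; cases heq
    · next l1 heq =>
      rw [List.getLast?_concat] at heq
      injection heq with heq
      subst heq
      by_cases hb : (PySem.Str.strip l == "") = true
      · rw [if_pos hb, List.dropWhile_cons_of_pos (show pvBlank l = true from hb), ih]
        rfl
      · rw [if_neg hb, List.dropWhile_cons_of_neg (show ¬ pvBlank l = true from hb)]
        simp

-- A's flattening foldl is B's flatMap
theorem pvFlat_eq (entries : List String) (acc : List String) :
    entries.foldl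
      (fun acc entry => (PySem.Str.splitlines entry).foldl
        (fun acc2 raw => acc2 ++ [PySem.Str.rstrip raw]) acc) acc
      = acc ++ pvFlatLines entries := by
  induction entries generalizing acc with
  | nil => simp [pvFlatLines]
  | cons e es ih =>
    simp only [List.foldl_cons, pvFlatLines, List.flatMap_cons,
      PySem.List.foldl_append_singleton_eq_map]
    simp [List.flatMap_def]

theorem pvBlank_strip (l : String) (h : pvBlank l = true) : PySem.Str.strip l = "" := by
  simpa [pvBlank] using h

-- A's validation loop on a list without consecutive blanks
theorem pvA_loop_spec (xs : List String) (br ne : Int) (cleaned : List String)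
    (hadj : ((xs.zip xs.tail).all (fun p => !(pvBlank p.1 && pvBlank p.2))) = true)
    (hbr : br = 0 ∨ ∀ h ∈ xs.head?, pvBlank h = false) :
    pvA_loop xs br ne cleaned =
      some (cleaned ++ xs.map PySem.Str.strip,
            ne + (xs.countP (fun l => !pvBlank l) : Int)) := by
  induction xs generalizing br ne cleaned with
  | nil => simp [pvA_loop]
  | cons x rest ih =>
    have hrest_adj : ((rest.zip rest.tail).all (fun p => !(pvBlank p.1 && pvBlank p.2))) = true := by
      rcases rest with _ | ⟨r, rs⟩
      · simp
      · exact List.all_eq_true.mpr fun p hp =>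
          List.all_eq_true.mp hadj p (List.mem_cons_of_mem _ hp)
    by_cases hb : pvBlank x = true
    · have hbr0 : br = 0 := by
        rcases hbr with hbr | hbr
        · exact hbr
        · have hx := hbr x (by simp)
          rw [hb] at hx; exact absurd hx (by simp)
      subst hbr0
      have hhead : ∀ h ∈ rest.head?, pvBlank h = false := by
        rcases rest with _ | ⟨r, rs⟩
        · simp
        · intro hh hmem
          simp at hmem
          subst hmem
          have hp := List.all_eq_true.mp hadj (x, r) List.mem_cons_self
          simp [hb] at hp
          exact hp
      have hrec := ih 1 ne (cleaned ++ [""]) hrest_adj (Or.inr hhead)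
      have hs : PySem.Str.strip x = "" := pvBlank_strip x hb
      rw [pvA_loop, if_pos (show (PySem.Str.strip x == "") = true from by simp [hs]),
        if_neg (show ¬ ((0 : Int) + 1 > 1) from by omega),
        show (0 : Int) + 1 = 1 from by norm_num, hrec]
      simp [hs, hb]
    · have hs : ¬ PySem.Str.strip x = "" := by simpa [pvBlank] using hb
      have hrec := ih 0 (ne + 1) (cleaned ++ [PySem.Str.strip x]) hrest_adj (Or.inl rfl)
      rw [pvA_loop, if_neg (show ¬ (PySem.Str.strip x == "") = true from by simp [hs]), hrec]
      simp [hb]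
      omega

-- heads of the trimmed list
theorem pvHead_dropWhile (xs : List String) :
    ∀ h ∈ (xs.dropWhile pvBlank).head?, pvBlank h = false := by
  induction xs with
  | nil => simp
  | cons x xs ih =>
    by_cases hb : pvBlank x = true
    · rw [List.dropWhile_cons_of_pos hb]; exact ih
    · rw [List.dropWhile_cons_of_neg (by simp [hb])]
      intro h hh; simp at hh; subst hh; simpa using hb

theorem pvDT_head? (ys : List String) (h : pvDT ys ≠ []) :
    (pvDT ys).head? = ys.head? := by
  induction ys using List.reverseRecOn with
  | nil => rfl
  | append_singleton zs l ih =>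
    by_cases hb : pvBlank l = true
    · have hDT : pvDT (zs ++ [l]) = pvDT zs := by
        unfold pvDT
        rw [List.reverse_append]
        simp only [List.reverse_cons, List.reverse_nil, List.nil_append,
          List.singleton_append]
        rw [List.dropWhile_cons_of_pos hb]
      rw [hDT] at h ⊢
      rw [ih h]
      have hzs : zs ≠ [] := by
        rintro rfl; simp [pvDT] at h
      rcases zs with _ | ⟨z, zsr⟩
      · exact absurd rfl hzs
      · simp
    · have hDT : pvDT (zs ++ [l]) = zs ++ [l] := by
        unfold pvDT
        rw [List.reverse_append]
        simp only [List.reverse_cons, List.reverse_nil, List.nil_append,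
          List.singleton_append]
        rw [List.dropWhile_cons_of_neg (show ¬ pvBlank l = true from hb)]
        simp
      rw [hDT]

theorem pvCountP_dropWhile (xs : List String) :
    (xs.dropWhile pvBlank).countP (fun l => !pvBlank l)
      = xs.countP (fun l => !pvBlank l) := by
  induction xs with
  | nil => rfl
  | cons x xs ih =>
    by_cases hb : pvBlank x = true
    · rw [List.dropWhile_cons_of_pos hb, List.countP_cons]
      simp [hb, ih]
    · rw [List.dropWhile_cons_of_neg (by simp [hb])]

theorem pvCountP_trim (xs : List String) :
    (pvDT (xs.dropWhile pvBlank)).countP (fun l => !pvBlank l)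
      = xs.countP (fun l => !pvBlank l) := by
  unfold pvDT
  rw [List.countP_reverse, pvCountP_dropWhile, List.countP_reverse, pvCountP_dropWhile]

-- ===== VERDICT (by name: the statement is the Claim_ definition above) =====
theorem split_context_lines_py_spec : Claim_equal_split_context_lines_py := by
  intro entries _hdom hpre
  obtain ⟨h1, h2, h3⟩ := hpre
  unfold Spec_split_context_lines_py
  have ht : pvDT ((pvFlatLines entries).dropWhile pvBlank) = pvTrimmed entries := rfl
  -- ===== A computes (pvTrimmed entries).map strip =====
  have hA : split_context_lines_py entries
      = (pvTrimmed entries).map PySem.Str.strip := by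
    have hflat := pvFlat_eq entries []
    rw [List.nil_append] at hflat
    simp only [split_context_lines_py]
    rw [hflat, pvA_dropLead_eq, pvA_dropTrail_eq, ht, if_neg h1]
    have hhead : ∀ h ∈ (pvTrimmed entries).head?, pvBlank h = false := by
      intro h hh
      rw [← ht, pvDT_head? _ (by rw [ht]; exact h1)] at hh
      exact pvHead_dropWhile (pvFlatLines entries) h hh
    rw [pvA_loop_spec (pvTrimmed entries) 0 0 [] h2 (Or.inr hhead)]
    show (if (0 : Int) + ((pvTrimmed entries).countP (fun l => !pvBlank l) : Int) > 8
        then [] else [] ++ (pvTrimmed entries).map PySem.Str.strip) = _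
    rw [if_neg (show ¬ ((0 : Int) + ((pvTrimmed entries).countP (fun l => !pvBlank l) : Int) > 8) from by omega)]
    simp
  -- ===== B computes the same =====
  have hJne : pvIdx (pvFlatLines entries) 0 ≠ [] := by
    intro hnil
    have hall := (pvIdx_eq_nil_iff (pvFlatLines entries) 0).mp hnil
    have hdw : (pvFlatLines entries).dropWhile pvBlank = [] :=
      List.dropWhile_eq_nil_iff.mpr hall
    apply h1
    rw [← ht, hdw]; rfl
  rcases hJ : pvIdx (pvFlatLines entries) 0 with _ | ⟨j, js⟩
  · exact absurd hJ hJne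
  have hkeep : ((PySem.List.enumerate (pvFlatLines entries) (0 : Int)).filter
      (fun p => PySem.Str.strip p.2 != "")).map (fun p => p.1)
        = ((j : Int)) :: js.map (Nat.cast : Nat → Int) := by
    rw [show (0 : Int) = ((0 : Nat) : Int) from by simp, pvKeep_eq, hJ, List.map_cons]
  have hkl? : (pvIdx (pvFlatLines entries) 0).getLast? = some ((j :: js).getLast (by simp)) := by
    rw [hJ, List.getLast?_eq_some_getLast]
  have hglInt : (((j : Int)) :: js.map (Nat.cast : Nat → Int)).getLast (by simp)
      = (Nat.cast ((j :: js).getLast (by simp)) : Int) := by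
    have e1 := List.getLast?_eq_some_getLast
      (l := ((j : Int)) :: js.map (Nat.cast : Nat → Int)) (by simp)
    have e2 : ((j :: js).map (Nat.cast : Nat → Int)).getLast?
        = some (Nat.cast ((j :: js).getLast (by simp)) : Int) := by
      rw [List.getLast?_map, List.getLast?_eq_some_getLast]
      rfl
    rw [List.map_cons] at e2
    exact Option.some_inj.mp (e1.symm.trans e2)
  have htrim : ((pvFlatLines entries).drop j).take ((j :: js).getLast (by simp) + 1 - j)
      = pvTrimmed entries := by
    rw [← ht]
    exact pvSlice_eq_trim (pvFlatLines entries) j ((j :: js).getLast (by simp))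
      (by rw [hJ]; rfl) hkl?
  have hany : ((pvTrimmed entries).zip (pvTrimmed entries).tail).any
      (fun p => PySem.Str.strip p.1 == "" && PySem.Str.strip p.2 == "") = false := by
    apply List.any_eq_false.mpr
    intro x hx hcontr
    have h5 := List.all_eq_true.mp h2 x hx
    simp [pvBlank] at h5
    simp at hcontr
    tauto
  have hlen : (((j : Int)) :: js.map (Nat.cast : Nat → Int)).length
      = (pvTrimmed entries).countP (fun l => !pvBlank l) := by
    have e1 : (((j : Int)) :: js.map (Nat.cast : Nat → Int)).length
        = (pvIdx (pvFlatLines entries) 0).length := by rw [hJ]; simp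
    rw [e1, pvIdx_length, ← ht]
    exact (pvCountP_trim (pvFlatLines entries)).symm
  have hB : split_context_lines_py_alt entries
      = (pvTrimmed entries).map PySem.Str.strip := by
    simp only [split_context_lines_py_alt]
    split
    · next hnil => rw [hkeep] at hnil; cases hnil
    · next k0 ks hcons =>
      rw [hkeep] at hcons
      injection hcons with h6 h7
      subst h6
      subst h7
      rw [hglInt]
      rw [show ((Nat.cast ((j :: js).getLast (by simp)) : Int) + 1)
          = (((j :: js).getLast (by simp) + 1 : Nat) : Int) from by push_cast; ring]
      rw [PySem.List.slice_natCast, htrim, PySem.List.slice_from_one]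
      rw [if_neg (show ¬ (_ = true) from by rw [hany]; simp)]
      rw [if_neg (show ¬ (PySem.List.len (((j : Int)) :: js.map (Nat.cast : Nat → Int)) > 8) from by
        rw [PySem.List.len_eq, hlen]; omega)]
  rw [hA, hB]
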